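-- pv_equiv track=rewrite | github.com/Riteshyadav025/Python-Lab- | 16-02-2026 To 21-02-2026/monotonic_stack.py | max_visible_people
-- ===== SOURCE A (Python) =====
-- def max_visible_people(arr):
--     n = len(arr)
--     max_seen = 0
--
--     for i in range(n):
--         count = 1
--
--         for j in range(i-1, -1, -1):
--             if arr[j] < arr[i]:
--                 count += 1
--             else:
--                 count += 1
--                 break
--
--         for j in range(i+1, n):
--             if arr[j] < arr[i]:
--                 count += 1
--             else:
--                 count += 1
--                 break
--
--         max_seen = max(max_seen, count)
--
--     return max_seen
-- ===== SOURCE B (Python) =====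
-- def max_visible_people(arr):
--     # O(n) monotonic stack of (value, span): span = length of the block of
--     # consecutive elements this entry covers (itself + everything it popped).
--     def left_counts(a):
--         res, stack = [], []
--         for v in a:
--             s = 0
--             while stack and stack[-1][0] < v:
--                 s += stack.pop()[1]
--             res.append(s + 1 if stack else s)
--             stack.append((v, s + 1))
--         return res
--
--     L = left_counts(arr)
--     R = left_counts(arr[::-1])[::-1]
--     return max((1 + L[i] + R[i] for i in range(len(arr))), default=0)
-- ===== Notes on version B (the rewrite author's own statement) =====
-- stated objective: faster
-- what changed: Replaced A's per-index left/right linear scans (quadratic) by two linear monotonic-stack passes over (value, span) pairs that compute each index's visible-run-plus-blocker count, then one max over the combined counts.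
import Mathlib
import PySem

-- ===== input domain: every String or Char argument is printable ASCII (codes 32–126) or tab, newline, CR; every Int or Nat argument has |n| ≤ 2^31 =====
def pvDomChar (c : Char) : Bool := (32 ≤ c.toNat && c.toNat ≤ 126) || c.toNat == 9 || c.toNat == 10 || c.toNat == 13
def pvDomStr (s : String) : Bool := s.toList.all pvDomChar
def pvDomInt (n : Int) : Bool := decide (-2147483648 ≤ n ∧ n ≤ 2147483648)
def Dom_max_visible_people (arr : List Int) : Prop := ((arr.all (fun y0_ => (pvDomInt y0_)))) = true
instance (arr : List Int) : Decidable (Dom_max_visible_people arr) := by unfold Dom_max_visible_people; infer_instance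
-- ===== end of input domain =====

-- B replaces A's quadratic per-index left/right scans by two O(n) monotonic-stack
-- passes over (value, span) pairs; equivalence is proved for all inputs (A is total).

-- ===== PORT A =====
-- inner loops of A: 'for j in range(…): if arr[j] < v: count += 1 else: count += 1; break'
-- (the break becomes the non-recursive branch; indices produced by pyRange are in range,
-- so pyGetD with default 0 is exact)
def pvScanA (arr : List Int) (v : Int) : List Int → Int
  | [] => 0
  | j :: rest =>
    if PySem.List.pyGetD arr j 0 < v then 1 + pvScanA arr v rest else 1

def max_visible_people (arr : List Int) : Int :=
  let n : Int := arr.length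
  (PySem.List.pyRange 0 n 1).foldl (fun max_seen i =>
    let v := PySem.List.pyGetD arr i 0
    let count := 1 + pvScanA arr v (PySem.List.pyRange (i - 1) (-1) (-1))
                   + pvScanA arr v (PySem.List.pyRange (i + 1) n 1)
    max max_seen count) 0

-- ===== PORT B =====
-- 'while stack and stack[-1][0] < v: s += stack.pop()[1]' (stack top = list head)
def pvPop (v : Int) : List (Int × Int) → Int × List (Int × Int)
  | [] => (0, [])
  | (h, sp) :: rest =>
    if h < v then
      let r := pvPop v rest
      (sp + r.1, r.2)
    else (0, (h, sp) :: rest)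

-- Source B's left_counts loop body: pop, append the count, push (v, s + 1)
def pvStep (st : List Int × List (Int × Int)) (v : Int) : List Int × List (Int × Int) :=
  let p := pvPop v st.2
  (st.1 ++ [if p.2.isEmpty then p.1 else p.1 + 1], (v, p.1 + 1) :: p.2)

-- Source B's left_counts: fold over the values, state = (res, stack)
def pvLeftCounts (a : List Int) : List Int :=
  (a.foldl pvStep ([], [])).1

def max_visible_people_alt (arr : List Int) : Int :=
  let L := pvLeftCounts arr
  let R := (pvLeftCounts arr.reverse).reverse   -- arr[::-1] / [::-1]
  -- max(gen, default=0): Python's max over ints = seed with the first element,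
  -- fold binary max; the default 0 when the sequence is empty (exact, hand-ported)
  match (PySem.List.pyRange 0 (arr.length : Int) 1).map
      (fun i => 1 + PySem.List.pyGetD L i 0 + PySem.List.pyGetD R i 0) with
  | [] => 0
  | x :: t => t.foldl max x

-- ===== PRECONDITION & SPEC =====
def Spec_max_visible_people (arr : List Int) (out : Int) : Prop := out = max_visible_people_alt arr
instance (arr : List Int) (out : Int) : Decidable (Spec_max_visible_people arr out) := by unfold Spec_max_visible_people; infer_instance

-- ===== CLAIM (what is proved, stated in full; the proofs are below) =====
def Claim_equal_max_visible_people : Prop := ∀ (arr : List Int), Dom_max_visible_people arr → Spec_max_visible_people arr (max_visible_people arr)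

-- ===== LEMMAS AND PROOFS =====

-- specification kernel: count of a break-scan over a list (run of < v, plus the blocker)
def pvCnt (v : Int) : List Int → Int
  | [] => 0
  | x :: t => if x < v then 1 + pvCnt v t else 1

lemma pvCnt_append_lt (v : Int) (tl l : List Int) (h : ∀ x ∈ tl, x < v) :
    pvCnt v (tl ++ l) = tl.length + pvCnt v l := by
  induction tl with
  | nil => simp only [List.nil_append, List.length_nil, Int.natCast_zero, zero_add]
  | cons x t ih =>
    have hx : x < v := h x (by simp)
    simp only [List.cons_append, pvCnt, if_pos hx]
    rw [ih (fun y hy => h y (by simp [hy]))]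
    push_cast [List.length_cons]; ring

lemma pvCnt_nonneg (v : Int) (l : List Int) : 0 ≤ pvCnt v l := by
  cases l with
  | nil => simp [pvCnt]
  | cons x t =>
    simp only [pvCnt]
    split
    · have := pvCnt_nonneg v t; omega
    · omega

-- the stack invariant of B's monotonic stack: each entry (v, s) covers a block
-- v :: tail of the processed (reversed) prefix with every tail element < v
inductive pvInv : List Int → List (Int × Int) → Prop
  | nil : pvInv [] []
  | cons (v : Int) (tl rev : List Int) (st : List (Int × Int)) :
      (∀ x ∈ tl, x < v) → pvInv rev st →
      pvInv (v :: tl ++ rev) ((v, (tl.length : Int) + 1) :: st)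

lemma pvPop_spec (v : Int) : ∀ (rev : List Int) (st : List (Int × Int)), pvInv rev st →
    ∃ tl rest, rev = tl ++ rest ∧ (∀ x ∈ tl, x < v) ∧
      (pvPop v st).1 = (tl.length : Int) ∧ pvInv rest (pvPop v st).2 ∧
      pvCnt v rev = (pvPop v st).1 + (if (pvPop v st).2.isEmpty then 0 else 1) := by
  intro rev st h
  induction h with
  | nil =>
    exact ⟨[], [], by simp, by simp, by simp [pvPop], by simpa [pvPop] using pvInv.nil,
      by simp [pvPop, pvCnt]⟩
  | cons w tl rev' st' hlt hinv ih =>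
    by_cases hw : w < v
    · obtain ⟨tl2, rest2, he, hlt2, hlen, hinv2, hcnt⟩ := ih
      refine ⟨(w :: tl) ++ tl2, rest2, ?_, ?_, ?_, ?_, ?_⟩
      · simp [he]
      · intro x hx
        rcases List.mem_append.mp hx with hx | hx
        · rcases List.mem_cons.mp hx with rfl | hx
          · exact hw
          · exact lt_trans (hlt x hx) hw
        · exact hlt2 x hx
      · simp [pvPop, hw, hlen]; ring
      · simpa [pvPop, hw] using hinv2
      · have hall : ∀ x ∈ w :: tl, x < v := by
          intro x hx
          rcases List.mem_cons.mp hx with rfl | hx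
          · exact hw
          · exact lt_trans (hlt x hx) hw
        have h2 : pvCnt v (w :: tl ++ rev') = ((w :: tl).length : Int) + pvCnt v rev' :=
          pvCnt_append_lt v (w :: tl) rev' hall
        rw [h2, hcnt]
        simp [pvPop, hw]
        ring
    · refine ⟨[], w :: tl ++ rev', by simp, by simp, ?_, ?_, ?_⟩
      · simp [pvPop, hw]
      · simpa [pvPop, hw] using pvInv.cons w tl rev' st' hlt hinv
      · simp [pvPop, hw, pvCnt]

-- reference trace of left_counts
def pvSpecL (rev : List Int) : List Int → List Int
  | [] => []
  | v :: t => pvCnt v rev :: pvSpecL (v :: rev) t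

lemma pvFold_spec : ∀ (a : List Int) (res : List Int) (rev : List Int) (st : List (Int × Int)),
    pvInv rev st →
    (a.foldl pvStep (res, st)).1 = res ++ pvSpecL rev a := by
  intro a
  induction a with
  | nil => intro res rev st _; simp [pvSpecL]
  | cons v t ih =>
    intro res rev st h
    obtain ⟨tl, rest, he, hlt, hlen, hinv, hcnt⟩ := pvPop_spec v rev st h
    have hinv' : pvInv (v :: rev) ((v, (pvPop v st).1 + 1) :: (pvPop v st).2) := by
      rw [he, hlen]
      exact pvInv.cons v tl rest (pvPop v st).2 hlt hinv
    have hval : (if (pvPop v st).2.isEmpty then (pvPop v st).1 else (pvPop v st).1 + 1)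
        = pvCnt v rev := by
      rw [hcnt]; split <;> simp
    have hstep : pvStep (res, st) v
        = (res ++ [pvCnt v rev], (v, (pvPop v st).1 + 1) :: (pvPop v st).2) := by
      simp only [pvStep]
      rw [hval]
    rw [List.foldl_cons, hstep, ih (res ++ [pvCnt v rev]) (v :: rev) _ hinv']
    simp [pvSpecL]

lemma pvLeftCounts_eq (a : List Int) : pvLeftCounts a = pvSpecL [] a := by
  unfold pvLeftCounts
  simpa using pvFold_spec a [] [] [] pvInv.nil

lemma pvSpecL_length (rev a : List Int) : (pvSpecL rev a).length = a.length := by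
  induction a generalizing rev with
  | nil => simp [pvSpecL]
  | cons v t ih => simp [pvSpecL, ih]

lemma pvSpecL_getElem : ∀ (a rev : List Int) (i : Nat) (hi : i < a.length),
    (pvSpecL rev a)[i]'(by rw [pvSpecL_length]; exact hi)
      = pvCnt (a[i]) ((a.take i).reverse ++ rev) := by
  intro a
  induction a with
  | nil => intro rev i hi; simp at hi
  | cons v t ih =>
    intro rev i hi
    cases i with
    | zero => simp [pvSpecL]
    | succ k =>
      have hk : k < t.length := by simpa using hi
      simp only [pvSpecL, List.getElem_cons_succ]
      rw [ih (v :: rev) k hk]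
      simp [List.take_succ_cons]

-- A's inner loops compute pvCnt of the reversed prefix / the suffix
lemma pvScanA_left (arr : List Int) (v : Int) :
    ∀ (i : Nat), i ≤ arr.length →
      pvScanA arr v (PySem.List.pyRange ((i : Int) - 1) (-1) (-1))
        = pvCnt v ((arr.take i).reverse) := by
  intro i
  induction i with
  | zero => intro _; rw [PySem.List.pyRange_neg_one_eq_nil (by omega)]; simp [pvScanA, pvCnt]
  | succ k ih =>
    intro hk
    have hk' : k < arr.length := by omega
    rw [show ((k + 1 : Nat) : Int) - 1 = (k : Int) by push_cast; ring,
      PySem.List.pyRange_neg_one_cons (by omega)]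
    simp only [pvScanA, PySem.List.pyGetD_natCast]
    rw [List.getD_eq_getElem arr 0 hk']
    have htake : (arr.take (k + 1)).reverse = arr[k] :: (arr.take k).reverse := by
      rw [List.take_add_one, List.getElem?_eq_getElem hk']
      simp
    rw [htake]
    simp only [pvCnt]
    split
    · rw [← ih (by omega)]
    · rfl

lemma pvScanA_right (arr : List Int) (v : Int) :
    ∀ (d : Nat), d ≤ arr.length →
      pvScanA arr v (PySem.List.pyRange ((arr.length - d : Nat) : Int) (arr.length : Int) 1)
        = pvCnt v (arr.drop (arr.length - d)) := by
  intro d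
  induction d with
  | zero =>
    intro _
    rw [PySem.List.pyRange_one_eq_nil (by simp)]
    simp [pvScanA, pvCnt]
  | succ k ih =>
    intro hk
    set j : Nat := arr.length - (k + 1) with hj
    have hjlt : j < arr.length := by omega
    rw [PySem.List.pyRange_one_cons (by exact_mod_cast hjlt)]
    simp only [pvScanA, PySem.List.pyGetD_natCast]
    rw [List.getD_eq_getElem arr 0 hjlt]
    have hdrop : arr.drop j = arr[j] :: arr.drop (j + 1) := (List.getElem_cons_drop hjlt).symm
    rw [hdrop]
    simp only [pvCnt]
    have hj1 : (j : Int) + 1 = ((arr.length - k : Nat) : Int) := by omega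
    have hd1 : j + 1 = arr.length - k := by omega
    split
    · rw [hj1, ih (by omega), hd1]
    · rfl

-- per-index count common to both programs (total form, getD)
def pvCountAt (arr : List Int) (k : Nat) : Int :=
  1 + pvCnt (arr.getD k 0) ((arr.take k).reverse) + pvCnt (arr.getD k 0) (arr.drop (k + 1))

lemma pvCountAt_pos (arr : List Int) (k : Nat) : 0 ≤ pvCountAt arr k := by
  have h1 := pvCnt_nonneg (arr.getD k 0) ((arr.take k).reverse)
  have h2 := pvCnt_nonneg (arr.getD k 0) (arr.drop (k + 1))
  unfold pvCountAt; omega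

lemma pvScanA_right' (arr : List Int) (v : Int) (k : Nat) (hk : k < arr.length) :
    pvScanA arr v (PySem.List.pyRange ((k : Int) + 1) (arr.length : Int) 1)
      = pvCnt v (arr.drop (k + 1)) := by
  have h := pvScanA_right arr v (arr.length - (k + 1)) (by omega)
  have e : arr.length - (arr.length - (k + 1)) = k + 1 := by omega
  rw [e] at h
  have e2 : (((k + 1 : Nat)) : Int) = (k : Int) + 1 := by push_cast; ring
  rw [e2] at h
  exact h

lemma pvL_getD (arr : List Int) (k : Nat) (hk : k < arr.length) :
    (pvLeftCounts arr).getD k 0 = pvCnt (arr.getD k 0) ((arr.take k).reverse) := by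
  rw [pvLeftCounts_eq]
  have hlen : k < (pvSpecL [] arr).length := by rw [pvSpecL_length]; exact hk
  rw [List.getD_eq_getElem _ 0 hlen, pvSpecL_getElem arr [] k hk,
    List.getD_eq_getElem arr 0 hk]
  simp

lemma pvR_getD (arr : List Int) (k : Nat) (hk : k < arr.length) :
    ((pvLeftCounts arr.reverse).reverse).getD k 0 = pvCnt (arr.getD k 0) (arr.drop (k + 1)) := by
  rw [pvLeftCounts_eq]
  have hlen : k < ((pvSpecL [] arr.reverse).reverse).length := by
    rw [List.length_reverse, pvSpecL_length, List.length_reverse]; exact hk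
  rw [List.getD_eq_getElem _ 0 hlen, List.getElem_reverse]
  have hL : (pvSpecL [] arr.reverse).length = arr.length := by
    rw [pvSpecL_length, List.length_reverse]
  simp only [hL]
  have hj : arr.length - 1 - k < arr.reverse.length := by
    rw [List.length_reverse]; omega
  rw [pvSpecL_getElem arr.reverse [] (arr.length - 1 - k) (by rw [List.length_reverse]; omega)]
  have e1 : arr.reverse[arr.length - 1 - k]'hj = arr.getD k 0 := by
    rw [List.getElem_reverse, List.getD_eq_getElem arr 0 hk]
    congr 1
    omega
  have e2 : ((arr.reverse.take (arr.length - 1 - k)).reverse : List Int) = arr.drop (k + 1) := by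
    rw [List.take_reverse, List.reverse_reverse]
    congr 1
    omega
  rw [e1, e2]
  simp

-- ===== VERDICT (by name: the statement is the Claim_ definition above) =====
theorem max_visible_people_spec : Claim_equal_max_visible_people := by
  intro arr _
  unfold Spec_max_visible_people
  -- A's value as a fold of pvCountAt over List.range
  have hA : max_visible_people arr
      = List.foldl max 0 ((List.range arr.length).map (pvCountAt arr)) := by
    unfold max_visible_people
    simp only [PySem.List.pyRange_zero_nat arr.length, List.foldl_map]
    apply PySem.List.foldl_congr_mem
    intro acc k hkmem
    have hk : k < arr.length := List.mem_range.mp hkmem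
    rw [PySem.List.pyGetD_natCast arr k 0,
      pvScanA_left arr (arr.getD k 0) k (le_of_lt hk),
      pvScanA_right' arr (arr.getD k 0) k hk]
    rfl
  -- B's value over the same list of counts
  have hmap : (PySem.List.pyRange 0 (arr.length : Int) 1).map
      (fun i => 1 + PySem.List.pyGetD (pvLeftCounts arr) i 0
        + PySem.List.pyGetD ((pvLeftCounts arr.reverse).reverse) i 0)
      = (List.range arr.length).map (pvCountAt arr) := by
    rw [PySem.List.pyRange_zero_nat arr.length, List.map_map]
    apply List.map_congr_left
    intro k hkmem
    have hk : k < arr.length := List.mem_range.mp hkmem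
    simp only [Function.comp_apply, PySem.List.pyGetD_natCast]
    rw [pvL_getD arr k hk, pvR_getD arr k hk]
    rfl
  have hB : max_visible_people_alt arr
      = (match (List.range arr.length).map (pvCountAt arr) with
          | [] => (0 : Int) | x :: t => t.foldl max x) := by
    simp only [max_visible_people_alt]
    rw [hmap]
  rw [hA, hB]
  cases hc : (List.range arr.length).map (pvCountAt arr) with
  | nil => simp
  | cons x t =>
    have hx : 0 ≤ x := by
      have hmem : x ∈ (List.range arr.length).map (pvCountAt arr) := by rw [hc]; simp
      obtain ⟨k, _, hke⟩ := List.mem_map.mp hmem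
      rw [← hke]
      exact pvCountAt_pos arr k
    simp only [List.foldl_cons, max_eq_right hx]
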